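-- pv_equiv track=rewrite | github.com/dhmit/gender_analysis_web | backend/app/analysis/proximity.py | diff_gender_token_counters
-- ===== SOURCE A (Python) =====
-- from collections import Counter
--
-- def diff_gender_token_counters(gender_token_counters):
--     """
--     A helper function that determines the difference of token occurrences
--     across multiple Genders.
--     :param gender_token_counters: Dict[str, Counter]
--     >>> token_frequency_1 = Counter({'foo': 1, 'bar': 2, 'baz': 4})
--     >>> token_frequency_2 = Counter({'foo': 2, 'bar': 3, 'baz': 2})
--     >>> test = {'Male': token_frequency_1, 'Female': token_frequency_2}
--     >>> _diff_gender_token_counters(test).get('Male')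
--     Counter({'baz': 2, 'foo': -1, 'bar': -1})
--     """
--
--     difference_dict = {}
--
--     for gender in gender_token_counters:
--         current_difference = Counter()
--
--         for word, count in gender_token_counters[gender].items():
--             current_difference[word] = count
--
--         for other_gender in gender_token_counters:
--             if other_gender == gender:
--                 continue
--             other_adjective_frequency = gender_token_counters[other_gender]
--
--             for word, count in other_adjective_frequency.items():
--                 if word in current_difference.keys():
--                     current_difference[word] -= count
--
--         difference_dict[gender] = current_difference
--
--     return difference_dict
-- ===== SOURCE B (Python) =====
-- from collections import Counter
--
-- def diff_gender_token_counters(gender_token_counters):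
--     total = Counter()
--     for counter in gender_token_counters.values():
--         total.update(counter)
--     return {
--         gender: Counter({word: 2 * count - total[word]
--                          for word, count in counter.items()})
--         for gender, counter in gender_token_counters.items()
--     }
-- ===== Notes on version B (the rewrite author's own statement) =====
-- stated objective: faster
-- what changed: Replaces A's nested loop over every other gender per gender (subtracting counter by counter) with one global per-word total computed once, then each entry is the closed form 2*count - total[word].
import Mathlib
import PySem

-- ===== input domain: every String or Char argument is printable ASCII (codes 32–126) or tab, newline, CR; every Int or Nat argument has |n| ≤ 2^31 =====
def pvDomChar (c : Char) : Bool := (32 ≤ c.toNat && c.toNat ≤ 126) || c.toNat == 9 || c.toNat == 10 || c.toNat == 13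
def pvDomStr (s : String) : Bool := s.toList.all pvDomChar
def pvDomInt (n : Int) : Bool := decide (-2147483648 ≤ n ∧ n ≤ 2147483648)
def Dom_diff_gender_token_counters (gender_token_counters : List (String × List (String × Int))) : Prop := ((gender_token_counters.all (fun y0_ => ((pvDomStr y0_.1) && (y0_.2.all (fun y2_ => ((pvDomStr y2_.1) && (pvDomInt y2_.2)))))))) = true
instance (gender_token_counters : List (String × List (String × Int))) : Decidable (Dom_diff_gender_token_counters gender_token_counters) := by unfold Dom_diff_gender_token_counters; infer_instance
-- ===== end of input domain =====

-- B replaces A's nested loop over all other genders (O(G^2 * W)) by one global total per word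
-- and the identity value = 2*count_g[w] - total[w] (O(G * W)); objective: faster (asymptotic).

-- Shared argument decoder: the Python parameter is a dict[str, Counter]; both ports receive the
-- same dict value, built from the association list with Python's dict insertion semantics.
def pyArgDict (l : List (String × List (String × Int))) :
    PySem.Dict String (PySem.Dict String Int) :=
  PySem.Dict.ofList (l.map (fun p => (p.1, PySem.Dict.ofList p.2)))

-- ===== PORT A =====
-- current_difference = Counter(); for word, count in gtc[gender].items(): current_difference[word] = count
def pyCurInit (c : PySem.Dict String Int) : PySem.Dict String Int :=
  c.items.foldl (fun cur wc => cur.insert wc.1 wc.2) PySem.Dict.empty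

-- for word, count in other.items(): if word in current_difference.keys(): current_difference[word] -= count
def pySubCounter (cur : PySem.Dict String Int) (c : PySem.Dict String Int) : PySem.Dict String Int :=
  c.items.foldl
    (fun cur wc => if cur.contains wc.1 then cur.insert wc.1 (cur.getD wc.1 0 - wc.2) else cur)
    cur

-- the body of A's outer loop for one gender
def pyCurFor (d : PySem.Dict String (PySem.Dict String Int)) (gender : String) :
    PySem.Dict String Int :=
  d.items.foldl
    (fun cur op => if op.1 == gender then cur else pySubCounter cur (d.getD op.1 PySem.Dict.empty))
    (pyCurInit (d.getD gender PySem.Dict.empty))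

def diff_gender_token_counters (gender_token_counters : List (String × List (String × Int))) :
    List (String × List (String × Int)) :=
  let d := pyArgDict gender_token_counters
  let difference_dict :=
    d.items.foldl (fun difference_dict gp => difference_dict.insert gp.1 (pyCurFor d gp.1))
      PySem.Dict.empty
  difference_dict.items.map (fun p => (p.1, p.2.items))

-- ===== PORT B =====
-- total = Counter(); for counter in gtc.values(): total.update(counter)
def pyTotal (d : PySem.Dict String (PySem.Dict String Int)) : PySem.Dict String Int :=
  d.values.foldl
    (fun t c => c.items.foldl (fun t wc => t.modify wc.1 0 (· + wc.2)) t)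
    PySem.Dict.empty

-- {gender: Counter({word: 2*count - total[word] for word, count in counter.items()}) for gender, counter in gtc.items()}
-- (a dict comprehension over the distinct keys of a dict builds its pairs in order: a map)
def diff_gender_token_counters_alt (gender_token_counters : List (String × List (String × Int))) :
    List (String × List (String × Int)) :=
  let d := pyArgDict gender_token_counters
  d.items.map (fun gp =>
    (gp.1, gp.2.items.map (fun wc => (wc.1, 2 * wc.2 - (pyTotal d).getD wc.1 0))))

-- ===== PRECONDITION & SPEC =====
def Spec_diff_gender_token_counters (gender_token_counters : List (String × List (String × Int))) (out : List (String × List (String × Int))) : Prop := out = diff_gender_token_counters_alt gender_token_counters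
instance (gender_token_counters : List (String × List (String × Int))) (out : List (String × List (String × Int))) : Decidable (Spec_diff_gender_token_counters gender_token_counters out) := by unfold Spec_diff_gender_token_counters; infer_instance

-- ===== CLAIM (what is proved, stated in full; the proofs are below) =====
def Claim_equal_diff_gender_token_counters : Prop := ∀ (gender_token_counters : List (String × List (String × Int))), Dom_diff_gender_token_counters gender_token_counters → Spec_diff_gender_token_counters gender_token_counters (diff_gender_token_counters gender_token_counters)

-- ===== LEMMAS AND PROOFS =====

-- total count contributed to word k by a list of (word, count) pairs
def pvSumMatch (os : List (String × Int)) (k : String) : Int :=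
  ((os.filter (fun p => p.1 == k)).map (·.2)).sum

theorem pvSumMatch_nil (k : String) : pvSumMatch [] k = 0 := rfl

theorem pvSumMatch_cons (a : String × Int) (os : List (String × Int)) (k : String) :
    pvSumMatch (a :: os) k = if a.1 == k then a.2 + pvSumMatch os k else pvSumMatch os k := by
  by_cases h : a.1 == k <;> simp [pvSumMatch, h]

theorem pvSumMatch_append (l₁ l₂ : List (String × Int)) (k : String) :
    pvSumMatch (l₁ ++ l₂) k = pvSumMatch l₁ k + pvSumMatch l₂ k := by
  simp [pvSumMatch]

theorem pvSumMatch_flatten_map {α : Type} (L : List α) (f : α → List (String × Int)) (k : String) :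
    pvSumMatch ((L.map f).flatten) k = (L.map (fun x => pvSumMatch (f x) k)).sum := by
  induction L with
  | nil => rfl
  | cons a L ih => simp [pvSumMatch_append, ih]

theorem pv_filter_single {α : Type} (l : List (String × α)) (h : (l.map (·.1)).Nodup)
    {g : String} {c : α} (hm : (g, c) ∈ l) : l.filter (fun p => p.1 == g) = [(g, c)] := by
  induction l with
  | nil => simp at hm
  | cons a l ih =>
    simp only [List.map_cons, List.nodup_cons] at h
    obtain ⟨hn, hnd⟩ := h
    rcases List.mem_cons.mp hm with heq | hm'
    · have ha : a = (g, c) := heq.symm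
      subst ha
      have hfl : l.filter (fun p => p.1 == g) = [] := by
        rw [List.filter_eq_nil_iff]
        intro p hp
        simp only [beq_iff_eq]
        intro hpe
        exact hn (hpe ▸ (List.mem_map.mpr ⟨p, hp, rfl⟩))
      simp [hfl]
    · have hne : (a.1 == g) = false := by
        simp only [beq_eq_false_iff_ne, ne_eq]
        intro he
        exact hn (he ▸ List.mem_map.mpr ⟨(g, c), hm', rfl⟩)
      simp [hne, ih hnd hm']

theorem pv_addfold_getD (l : List (String × Int)) (t : PySem.Dict String Int) (w : String) :
    (l.foldl (fun t wc => t.modify wc.1 0 (· + wc.2)) t).getD w 0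
      = t.getD w 0 + pvSumMatch l w := by
  induction l generalizing t with
  | nil => simp [pvSumMatch_nil]
  | cons a l ih =>
    simp only [List.foldl_cons]
    rw [ih, PySem.Dict.getD_modify]
    by_cases hw : w = a.1
    · simp only [hw, pvSumMatch_cons, beq_self_eq_true, if_true]
      ring
    · have hb : (a.1 == w) = false := by simp [beq_eq_false_iff_ne]; exact fun he => hw he.symm
      simp only [if_neg hw, pvSumMatch_cons, hb, Bool.false_eq_true, if_false]

theorem pvSumMatch_single (l : List (String × Int)) (h : (l.map (·.1)).Nodup)
    {g : String} {c : Int} (hm : (g, c) ∈ l) : pvSumMatch l g = c := by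
  simp [pvSumMatch, pv_filter_single l h hm]

theorem pv_sum_split {α : Type} (l : List α) (h : α → Int) (p : α → Bool) :
    (l.map h).sum = ((l.filter p).map h).sum + ((l.filter (fun a => !p a)).map h).sum := by
  induction l with
  | nil => rfl
  | cons a l ih => by_cases hp : p a <;> simp [hp, ih] <;> ring

theorem pyCurInit_eq (c : PySem.Dict String Int) (h : c.keys.Nodup) : pyCurInit c = c := by
  apply PySem.Dict.ext
  have hf := PySem.Dict.items_foldl_insert_fresh c.items (fun wc => wc.1) (fun wc => wc.2)
    PySem.Dict.empty (fun a _ => PySem.Dict.contains_empty _) h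
  unfold pyCurInit
  simpa using hf

theorem pySub_items (os : List (String × Int)) (cur : PySem.Dict String Int)
    (h : cur.keys.Nodup) :
    (os.foldl
        (fun cur wc => if cur.contains wc.1 then cur.insert wc.1 (cur.getD wc.1 0 - wc.2) else cur)
        cur).items
      = cur.items.map (fun wc => (wc.1, wc.2 - pvSumMatch os wc.1)) := by
  induction os generalizing cur with
  | nil => simp [pvSumMatch_nil]
  | cons a os ih =>
    simp only [List.foldl_cons]
    by_cases hc : cur.contains a.1
    · rw [if_pos hc]
      have hkeys : (cur.insert a.1 (cur.getD a.1 0 - a.2)).keys = cur.keys :=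
        PySem.Dict.keys_insert_of_contains cur _ hc
      rw [ih _ (hkeys ▸ h), PySem.Dict.items_insert_of_contains cur _ hc, List.map_map]
      apply List.map_congr_left
      intro p hp
      simp only [Function.comp]
      by_cases hpa : (p.1 == a.1) = true
      · have hpe : p.1 = a.1 := eq_of_beq hpa
        have hmem : (a.1, p.2) ∈ cur.items := by rw [← hpe]; simpa using hp
        have hget : cur.getD a.1 0 = p.2 := PySem.Dict.getD_of_mem_items cur hmem h 0
        have hak : (a.1 == p.1) = true := by simp [hpe]
        simp [pvSumMatch_cons, hget, hpe]
        ring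
      · have hak : (a.1 == p.1) = false := by
          simp only [beq_eq_false_iff_ne, ne_eq]
          intro he
          exact hpa (by simp [he])
        simp [hpa, pvSumMatch_cons, hak]
    · rw [if_neg hc]
      rw [ih _ h]
      apply List.map_congr_left
      intro p hp
      have hpk : p.1 ∈ cur.keys := by
        simp only [PySem.Dict.keys]
        exact List.mem_map.mpr ⟨p, hp, rfl⟩
      have hak : (a.1 == p.1) = false := by
        simp only [beq_eq_false_iff_ne, ne_eq]
        intro he
        exact absurd ((PySem.Dict.contains_iff_mem_keys cur a.1).mpr (he ▸ hpk)) (by simp [hc])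
      simp [pvSumMatch_cons, hak]

theorem pyTotal_getD (d : PySem.Dict String (PySem.Dict String Int)) (w : String) :
    (pyTotal d).getD w 0 = pvSumMatch ((d.items.map (fun gp => gp.2.items)).flatten) w := by
  unfold pyTotal
  have hval : d.values = d.items.map (fun gp => gp.2) := rfl
  rw [hval, List.foldl_map]
  have hflat :
      ((d.items.map (fun gp => gp.2.items)).flatten).foldl
          (fun t wc => t.modify wc.1 0 (· + wc.2)) (PySem.Dict.empty : PySem.Dict String Int)
        = d.items.foldl
            (fun t gp => gp.2.items.foldl (fun t wc => t.modify wc.1 0 (· + wc.2)) t)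
            PySem.Dict.empty := by
    rw [List.foldl_flatten]
    rw [List.foldl_map]
  rw [← hflat, pv_addfold_getD]
  simp [PySem.Dict.getD_empty]

theorem pv_foldl_insert_values_prop {ν : Type} (P : ν → Prop)
    (ps : List (String × ν)) (d : PySem.Dict String ν)
    (hd : ∀ q ∈ d.items, P q.2) (hp : ∀ q ∈ ps, P q.2) :
    ∀ q ∈ (ps.foldl (fun acc p => acc.insert p.1 p.2) d).items, P q.2 := by
  induction ps generalizing d with
  | nil => simpa using hd
  | cons a ps ih =>
    simp only [List.foldl_cons]
    apply ih
    · intro q hq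
      rcases (PySem.Dict.mem_items_insert d a.1 a.2 q).mp hq with h1 | h2
      · rw [h1]; exact hp a (by simp)
      · exact hd q h2.1
    · intro q hq; exact hp q (by simp [hq])

theorem pyArg_values_nodup (l : List (String × List (String × Int))) :
    ∀ gp ∈ (pyArgDict l).items, gp.2.keys.Nodup := by
  have hof : pyArgDict l
      = (l.map (fun p => (p.1, PySem.Dict.ofList p.2))).foldl
          (fun acc p => acc.insert p.1 p.2) PySem.Dict.empty := rfl
  rw [hof]
  refine pv_foldl_insert_values_prop (fun v : PySem.Dict String Int => v.keys.Nodup) _ _ ?_ ?_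
  · intro q hq
    have hemp : (PySem.Dict.empty : PySem.Dict String (PySem.Dict String Int)).items = [] := rfl
    rw [hemp] at hq
    simp at hq
  · intro q hq
    rcases List.mem_map.mp hq with ⟨p, _, rfl⟩
    exact PySem.Dict.nodup_keys_ofList _

theorem pyCurFor_items (d : PySem.Dict String (PySem.Dict String Int))
    (hk : d.keys.Nodup) (hv : ∀ gp ∈ d.items, gp.2.keys.Nodup)
    (gp : String × PySem.Dict String Int) (hgp : gp ∈ d.items) :
    (pyCurFor d gp.1).items
      = gp.2.items.map (fun wc => (wc.1, 2 * wc.2 - (pyTotal d).getD wc.1 0)) := by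
  have hgp' : (gp.1, gp.2) ∈ d.items := by simpa using hgp
  have hdg : d.getD gp.1 PySem.Dict.empty = gp.2 := PySem.Dict.getD_of_mem_items d hgp' hk _
  have hknd : (d.items.map (fun p => p.1)).Nodup := hk
  have hvnd : (gp.2.items.map (fun p => p.1)).Nodup := hv gp hgp
  unfold pyCurFor
  rw [hdg, pyCurInit_eq gp.2 (hv gp hgp)]
  have h1 : d.items.foldl
        (fun cur op =>
          if op.1 == gp.1 then cur else pySubCounter cur (d.getD op.1 PySem.Dict.empty))
        gp.2
      = d.items.foldl
        (fun cur op => if (!(op.1 == gp.1)) = true then pySubCounter cur op.2 else cur) gp.2 := by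
    apply PySem.List.foldl_congr_mem
    intro acc x hx
    have hx2 : d.getD x.1 PySem.Dict.empty = x.2 :=
      PySem.Dict.getD_of_mem_items d (by simpa using hx) hk _
    cases hb : x.1 == gp.1 <;> simp [hx2]
  rw [h1, ← List.foldl_filter]
  have h2 : (d.items.filter (fun op => !(op.1 == gp.1))).foldl
        (fun cur op => pySubCounter cur op.2) gp.2
      = (((d.items.filter (fun op => !(op.1 == gp.1))).map (fun op => op.2.items)).flatten).foldl
          (fun cur wc =>
            if cur.contains wc.1 then cur.insert wc.1 (cur.getD wc.1 0 - wc.2) else cur) gp.2 := by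
    rw [List.foldl_flatten]
    rw [List.foldl_map]
    rfl
  rw [h2, pySub_items _ _ (hv gp hgp)]
  apply List.map_congr_left
  intro wc hwc
  have hwceta : (wc.1, wc.2) ∈ gp.2.items := by simpa using hwc
  have hT : (pyTotal d).getD wc.1 0
      = (d.items.map (fun gp' => pvSumMatch gp'.2.items wc.1)).sum := by
    rw [pyTotal_getD, pvSumMatch_flatten_map]
  have hS : pvSumMatch (((d.items.filter (fun op => !(op.1 == gp.1))).map
        (fun op => op.2.items)).flatten) wc.1
      = ((d.items.filter (fun op => !(op.1 == gp.1))).map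
          (fun gp' => pvSumMatch gp'.2.items wc.1)).sum :=
    pvSumMatch_flatten_map _ _ _
  have hsplit := pv_sum_split d.items (fun gp' => pvSumMatch gp'.2.items wc.1)
      (fun op => op.1 == gp.1)
  have hfil : d.items.filter (fun op => op.1 == gp.1) = [(gp.1, gp.2)] :=
    pv_filter_single d.items hknd hgp'
  have hown : pvSumMatch gp.2.items wc.1 = wc.2 := pvSumMatch_single gp.2.items hvnd hwceta
  rw [hfil] at hsplit
  simp only [List.map_cons, List.map_nil, List.sum_cons, List.sum_nil, hown] at hsplit
  have hval : wc.2 - pvSumMatch (((d.items.filter (fun op => !(op.1 == gp.1))).map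
        (fun op => op.2.items)).flatten) wc.1
      = 2 * wc.2 - (pyTotal d).getD wc.1 0 := by
    rw [hS, hT, hsplit]
    ring
  rw [hval]

-- ===== VERDICT (by name: the statement is the Claim_ definition above) =====
theorem diff_gender_token_counters_spec : Claim_equal_diff_gender_token_counters := by
  intro gtc _dom
  unfold Spec_diff_gender_token_counters diff_gender_token_counters diff_gender_token_counters_alt
  have hk : (pyArgDict gtc).keys.Nodup := PySem.Dict.nodup_keys_ofList _
  have hv := pyArg_values_nodup gtc
  set d := pyArgDict gtc with hd
  have hfresh := PySem.Dict.items_foldl_insert_fresh d.items (fun gp => gp.1)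
    (fun gp => pyCurFor d gp.1) PySem.Dict.empty
    (by intro a _; exact PySem.Dict.contains_empty _) hk
  have hemp : (PySem.Dict.empty : PySem.Dict String (PySem.Dict String Int)).items = [] := rfl
  simp only [hfresh, hemp, List.nil_append, List.map_map]
  apply List.map_congr_left
  intro gp hgp
  simp only [Function.comp]
  exact congrArg (fun x => (gp.1, x)) (pyCurFor_items d hk hv gp hgp)
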